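-- pv_equiv track=rewrite | github.com/ejuet/terrain-layers | generate_package_diagram.py | nearest_known
-- ===== SOURCE A (Python) =====
-- def nearest_known(name: str | None, modules: set[str]) -> str | None:
--     current = name or ""
--     while current:
--         if current in modules:
--             return current
--         if "." not in current:
--             return None
--         current = current.rsplit(".", 1)[0]
--     return None
-- ===== SOURCE B (Python) =====
-- def nearest_known(name: str | None, modules: set[str]) -> str | None:
--     # Scan the module set once, keeping the longest m that is a dotted prefix of name.
--     if not name:
--         return None
--     best = None
--     for m in modules:
--         if m and (name == m or name.startswith(m + ".")):
--             if best is None or len(m) > len(best):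
--                 best = m
--     return best
-- ===== Notes on version B (the rewrite author's own statement) =====
-- stated objective: alternative
-- what changed: Instead of peeling trailing dotted components off the name and probing the set for each, B makes a single pass over the modules collection, keeping the longest m that equals the name or is a dotted prefix of it (name.startswith(m + '.')).
import Mathlib
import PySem

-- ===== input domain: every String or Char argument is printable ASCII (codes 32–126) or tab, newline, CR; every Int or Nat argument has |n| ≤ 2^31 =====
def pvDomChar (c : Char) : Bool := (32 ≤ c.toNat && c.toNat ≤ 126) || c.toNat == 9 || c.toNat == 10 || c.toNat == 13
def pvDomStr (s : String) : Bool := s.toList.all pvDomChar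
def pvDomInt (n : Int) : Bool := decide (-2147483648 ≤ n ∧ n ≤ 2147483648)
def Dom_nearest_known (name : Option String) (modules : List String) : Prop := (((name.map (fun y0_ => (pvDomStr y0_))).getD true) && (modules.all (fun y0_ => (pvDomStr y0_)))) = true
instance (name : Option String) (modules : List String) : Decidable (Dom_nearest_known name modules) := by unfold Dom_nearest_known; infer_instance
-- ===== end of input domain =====

-- B re-implements A by one scan over the modules collection (longest dotted-prefix match)
-- instead of A's walk up the name's dotted hierarchy; same cost class, different traversal.

-- ===== PORT A =====
-- current.rsplit(".", 1)[0] for a string known to contain '.': everything before the last '.'.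
-- Exact hand port (PySem has no rsplit): drop the dot-free tail off the reversed chars, drop the dot, reverse back.
def rsplitDotHead (cs : List Char) : List Char :=
  ((cs.reverse.dropWhile (fun c => c ≠ '.')).drop 1).reverse

theorem rsplitDotHead_length_lt (cs : List Char) (h : '.' ∈ cs) :
    (rsplitDotHead cs).length < cs.length := by
  unfold rsplitDotHead
  have h' : '.' ∈ cs.reverse := by simpa using h
  have hd : cs.reverse.dropWhile (fun c => c ≠ '.') ≠ [] := by
    intro hnil
    have := List.dropWhile_eq_nil_iff.mp hnil
    have := this '.' h'
    simp at this
  have hle : (cs.reverse.dropWhile (fun c => c ≠ '.')).length ≤ cs.length := by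
    simpa using List.length_dropWhile_le (fun c => c ≠ '.') cs.reverse
  have hpos : 0 < (cs.reverse.dropWhile (fun c => c ≠ '.')).length :=
    List.length_pos_iff.mpr hd
  simp only [List.length_reverse, List.length_drop]
  omega

-- the while-loop of A, step for step
def nearestKnownLoop (current : List Char) (modules : List String) : Option String :=
  if current.isEmpty then none
  else if modules.contains (String.ofList current) then some (String.ofList current)
  else if PySem.Chars.isIn ['.'] current = false then none
  else nearestKnownLoop (rsplitDotHead current) modules
termination_by current.length
decreasing_by
  rename_i h1 h2 h3
  exact rsplitDotHead_length_lt current (by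
    have := PySem.Chars.isIn_iff_infix (sub := ['.']) (s := current) |>.mp (by
      cases hb : PySem.Chars.isIn ['.'] current with
      | false => exact absurd hb h3
      | true => rfl)
    rcases this with ⟨l, r, hlr⟩
    subst hlr; simp)

def nearest_known (name : Option String) (modules : List String) : Option String :=
  nearestKnownLoop ((name.getD "").toList) modules

-- ===== PORT B =====
-- Source B's candidate test  m and (name == m or name.startswith(m + "."))  (on char lists, per convention)
def altCond (n m : List Char) : Bool :=
  !m.isEmpty && (n == m || PySem.Chars.startswith n (m ++ ['.']))

-- Source B's for-loop: keep the longest matching module (first one on ties)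
def altLoop (n : List Char) (modules : List String) : Option String :=
  modules.foldl (fun best m =>
    if altCond n m.toList then
      match best with
      | none => some m
      | some b => if b.toList.length < m.toList.length then some m else some b
    else best) none

def nearest_known_alt (name : Option String) (modules : List String) : Option String :=
  match name with
  | none => none
  | some n => if n.toList.isEmpty then none else altLoop n.toList modules

-- ===== PRECONDITION & SPEC =====
def Spec_nearest_known (name : Option String) (modules : List String) (out : Option String) : Prop := out = nearest_known_alt name modules
instance (name : Option String) (modules : List String) (out : Option String) : Decidable (Spec_nearest_known name modules out) := by unfold Spec_nearest_known; infer_instance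

-- ===== CLAIM (what is proved, stated in full; the proofs are below) =====
def Claim_equal_nearest_known : Prop := ∀ (name : Option String) (modules : List String), Dom_nearest_known name modules → Spec_nearest_known name modules (nearest_known name modules)

-- ===== LEMMAS AND PROOFS =====

-- the fold step of altLoop
def altStep (n : List Char) (best : Option String) (m : String) : Option String :=
  if altCond n m.toList then
    match best with
    | none => some m
    | some b => if b.toList.length < m.toList.length then some m else some b
  else best

theorem altLoop_eq_foldl (n : List Char) (modules : List String) :
    altLoop n modules = modules.foldl (altStep n) none := by
  unfold altLoop altStep; rfl

-- a fold over a candidate-free list returns its accumulator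
theorem foldl_no_candidate (n : List Char) :
    ∀ (l : List String) (acc : Option String),
    (∀ m ∈ l, altCond n m.toList = false) → l.foldl (altStep n) acc = acc := by
  intro l
  induction l with
  | nil => intro acc _; rfl
  | cons m t ih =>
      intro acc h
      have hm : altCond n m.toList = false := h m (by simp)
      simp only [List.foldl_cons, altStep, hm, Bool.false_eq_true, if_false]
      exact ih acc (fun x hx => h x (by simp [hx]))

-- if c is a candidate and strictly the longest one, the loop returns c
theorem foldl_best (n : List Char) (c : String) :
    ∀ (l : List String) (acc : Option String),
    (∀ m ∈ l, altCond n m.toList = true →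
        m.toList.length ≤ c.toList.length ∧ (m.toList.length = c.toList.length → m = c)) →
    altCond n c.toList = true →
    (acc = some c ∨ (c ∈ l ∧ ∀ b, acc = some b → b.toList.length < c.toList.length)) →
    l.foldl (altStep n) acc = some c := by
  intro l
  induction l with
  | nil =>
      intro acc _ _ hacc
      rcases hacc with h | ⟨h, _⟩
      · simpa using h
      · simp at h
  | cons m t ih =>
      intro acc hmax hc hacc
      have hmax' : ∀ x ∈ t, altCond n x.toList = true →
          x.toList.length ≤ c.toList.length ∧ (x.toList.length = c.toList.length → x = c) :=
        fun x hx => hmax x (by simp [hx])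
      rcases hacc with rfl | ⟨hcl, hb⟩
      · -- acc = some c is absorbing
        have hstep : altStep n (some c) m = some c := by
          unfold altStep
          by_cases hP : altCond n m.toList = true
          · have h1 := hmax m (by simp) hP
            have h2 : ¬ c.length < m.length := by
              have := h1.1; simp only [String.length_toList] at this ⊢; omega
            simp [hP, h2]
          · simp [hP]
        rw [List.foldl_cons, hstep]
        exact ih (some c) hmax' hc (Or.inl rfl)
      · rw [List.foldl_cons]
        by_cases hP : altCond n m.toList = true
        · have hlen := hmax m (by simp) hP
          by_cases hmc : m = c
          · subst hmc
            have hstep : altStep n acc m = some m := by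
              unfold altStep
              cases acc with
              | none => simp [hP]
              | some b =>
                  have h' : b.length < m.length := by simpa using hb b rfl
                  simp [hP, h']
            rw [hstep]
            exact ih (some m) hmax' hc (Or.inl rfl)
          · have hlt : m.toList.length < c.toList.length := by
              rcases Nat.lt_or_ge m.toList.length c.toList.length with h | h
              · exact h
              · exact absurd (hlen.2 (by omega)) hmc
            have hct : c ∈ t := by
              rcases List.mem_cons.mp hcl with rfl | h
              · exact absurd rfl hmc
              · exact h
            refine ih _ hmax' hc (Or.inr ⟨hct, ?_⟩)
            intro b hbeq
            unfold altStep at hbeq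
            simp only [hP, if_true] at hbeq
            cases acc with
            | none =>
                simp at hbeq; subst hbeq; exact hlt
            | some b0 =>
                have hb0 := hb b0 rfl
                by_cases hcmp : b0.length < m.length
                · simp [hcmp] at hbeq; subst hbeq; exact hlt
                · simp [hcmp] at hbeq; subst hbeq; exact hb0
        · have hstep : altStep n acc m = acc := by
            unfold altStep; simp [hP]
          rw [hstep]
          have hct : c ∈ t := by
            rcases List.mem_cons.mp hcl with rfl | h
            · exact absurd hc (by simp [hP])
            · exact h
          exact ih acc hmax' hc (Or.inr ⟨hct, hb⟩)

-- candidates are never longer than the name, and only the name itself reaches its length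
theorem cond_length (n m : List Char) (h : altCond n m = true) :
    m.length ≤ n.length ∧ (m.length = n.length → m = n) := by
  unfold altCond at h
  simp only [Bool.and_eq_true, Bool.or_eq_true] at h
  rcases h.2 with heq | hpre
  · have : n = m := by simpa using heq
    subst this; exact ⟨le_rfl, fun _ => rfl⟩
  · have hp : (m ++ ['.']) <+: n := (PySem.Chars.startswith_iff _ _).mp hpre
    have := hp.length_le
    simp at this
    constructor
    · omega
    · intro h'; omega

-- decomposition of a string containing '.' at its LAST dot
theorem dropWhile_head_false {p : Char → Bool} :
    ∀ (l : List Char) {x : Char} {t : List Char}, l.dropWhile p = x :: t → p x = false := by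
  intro l
  induction l with
  | nil => intro x t h; simp [List.dropWhile] at h
  | cons a l ih =>
      intro x t h
      by_cases hpa : p a = true
      · rw [List.dropWhile_cons_of_pos hpa] at h
        exact ih h
      · rw [List.dropWhile_cons_of_neg hpa] at h
        cases h
        simpa using hpa

theorem rsplit_decomp (cs : List Char) (h : '.' ∈ cs) :
    ∃ suf : List Char, cs = rsplitDotHead cs ++ '.' :: suf ∧ '.' ∉ suf := by
  have h' : '.' ∈ cs.reverse := by simpa using h
  have hd : cs.reverse.dropWhile (fun c => c ≠ '.') ≠ [] := by
    intro hnil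
    have := List.dropWhile_eq_nil_iff.mp hnil '.' h'
    simp at this
  obtain ⟨x, t, hxt⟩ := List.exists_cons_of_ne_nil hd
  have hx : x = '.' := by
    have := dropWhile_head_false cs.reverse hxt
    simpa using this
  subst hx
  have hr : rsplitDotHead cs = t.reverse := by
    unfold rsplitDotHead
    rw [hxt]
    simp
  refine ⟨(cs.reverse.takeWhile (fun c => c ≠ '.')).reverse, ?_, ?_⟩
  · rw [hr]
    conv_lhs => rw [← List.reverse_reverse cs,
      ← List.takeWhile_append_dropWhile (p := fun c => decide (c ≠ '.')) (l := cs.reverse)]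
    rw [hxt]
    simp
  · intro hmem
    have : '.' ∈ cs.reverse.takeWhile (fun c => c ≠ '.') := by simpa using hmem
    have := List.mem_takeWhile_imp this
    simp at this

-- walking past the last dotted component preserves the candidate predicate (for m ≠ name)
theorem cond_step (prev suf m : List Char) (hsuf : '.' ∉ suf)
    (hm : m ≠ prev ++ '.' :: suf) :
    altCond (prev ++ '.' :: suf) m = altCond prev m := by
  unfold altCond
  by_cases hempty : m.isEmpty
  · simp [hempty]
  · simp only [hempty, Bool.not_false, Bool.true_and]
    have hne1 : ((prev ++ '.' :: suf : List Char) == m) = false := by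
      simp only [beq_eq_false_iff_ne, ne_eq]
      exact fun h => hm h.symm
    rw [hne1]
    simp only [Bool.false_or]
    have hiff : PySem.Chars.startswith (prev ++ '.' :: suf) (m ++ ['.']) = true ↔
        ((prev == m) || PySem.Chars.startswith prev (m ++ ['.'])) = true := by
      rw [PySem.Chars.startswith_iff]
      constructor
      · rintro ⟨t, ht⟩
        have ht' : m ++ '.' :: t = prev ++ '.' :: suf := by
          simpa [List.append_assoc] using ht
        rcases Nat.lt_trichotomy m.length prev.length with hk | hk | hk
        · -- the dot at position m.length lies inside prev
          have htake : m = prev.take m.length := by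
            have h1 : (m ++ '.' :: t).take m.length = m := by simp
            have h2 : (prev ++ '.' :: suf).take m.length = prev.take m.length :=
              List.take_append_of_le_length (by omega)
            rw [ht', h2] at h1
            exact h1.symm
          have hget : prev[m.length]'(by omega) = '.' := by
            have h1 : (m ++ '.' :: t)[m.length]'(by simp) = '.' := by
              rw [List.getElem_append_right (le_refl m.length)]
              simp
            rw [List.getElem_of_eq ht'] at h1
            rw [List.getElem_append_left (by omega)] at h1
            exact h1
          have hpre2 : m ++ ['.'] = prev.take (m.length + 1) := by
            rw [List.take_add_one]
            rw [List.getElem?_eq_getElem (show m.length < prev.length by omega)]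
            simp [hget, ← htake]
          simp only [Bool.or_eq_true, beq_iff_eq]
          right
          rw [PySem.Chars.startswith_iff, hpre2]
          exact List.take_prefix _ _
        · -- m = prev
          have : m = prev := (List.append_inj ht' hk).1
          simp [this]
        · -- the dot would land inside suf: impossible
          exfalso
          have hlen : m.length < (prev ++ '.' :: suf).length := by
            have : (m ++ '.' :: t).length = (prev ++ '.' :: suf).length := by rw [ht']
            simp at this ⊢
            omega
          have h1 : (m ++ '.' :: t)[m.length]'(by simp) = '.' := by
            rw [List.getElem_append_right (le_refl m.length)]
            simp
          rw [List.getElem_of_eq ht'] at h1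
          rw [List.getElem_append_right (show prev.length ≤ m.length by omega)] at h1
          rw [List.getElem_cons] at h1
          rw [dif_neg (by omega : ¬ m.length - prev.length = 0)] at h1
          exact hsuf (h1 ▸ List.getElem_mem _)
      · intro h
        rcases Bool.or_eq_true _ _ |>.mp h with heq | hpre
        · have : prev = m := by simpa using heq
          subst this
          exact ⟨suf, by simp⟩
        · have hp : (m ++ ['.']) <+: prev := (PySem.Chars.startswith_iff _ _).mp hpre
          exact hp.trans ⟨'.' :: suf, rfl⟩
    cases hA : PySem.Chars.startswith (prev ++ '.' :: suf) (m ++ ['.']) with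
    | true => exact (hiff.mp hA).symm
    | false =>
        cases hB : ((prev == m) || PySem.Chars.startswith prev (m ++ ['.'])) with
        | true => rw [hiff.mpr hB] at hA; exact hA.symm
        | false => rfl

-- any altCond-candidate forces '.' ∈ name or m = name
theorem cond_dot_or_eq (n m : List Char) (h : altCond n m = true) :
    m = n ∨ '.' ∈ n := by
  unfold altCond at h
  simp only [Bool.and_eq_true, Bool.or_eq_true] at h
  rcases h.2 with heq | hpre
  · left; exact (by simpa using heq : n = m).symm
  · right
    have hp : (m ++ ['.']) <+: n := (PySem.Chars.startswith_iff _ _).mp hpre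
    exact hp.subset (by simp)

theorem main_lemma : ∀ (cs : List Char) (modules : List String),
    nearestKnownLoop cs modules = altLoop cs modules := by
  intro cs modules
  fun_induction nearestKnownLoop cs modules with
  | case1 cs hempty =>
      rw [altLoop_eq_foldl]
      rw [foldl_no_candidate]
      intro m _
      have : cs = [] := List.isEmpty_iff.mp hempty
      subst this
      unfold altCond
      cases hm : m.toList with
      | nil => simp
      | cons a t =>
          simp only [List.isEmpty_cons, Bool.not_false, Bool.true_and]
          have h1 : (([] : List Char) == a :: t) = false := by simp
          have h2 : PySem.Chars.startswith [] ((a :: t) ++ ['.']) = false := by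
            cases hs : PySem.Chars.startswith [] ((a :: t) ++ ['.']) with
            | false => rfl
            | true =>
                have := (PySem.Chars.startswith_iff _ _).mp hs
                have := this.length_le
                simp at this
          rw [h1, h2]
          rfl
  | case2 cs hempty hcont =>
      rw [altLoop_eq_foldl]
      have hc : String.ofList cs ∈ modules := by
        simpa using hcont
      refine (foldl_best cs (String.ofList cs) modules none ?_ ?_ (Or.inr ⟨hc, by simp⟩)).symm
      · intro m _ hP
        have := cond_length cs m.toList hP
        simp only [String.toList_ofList]
        refine ⟨this.1, fun h => ?_⟩
        have hml := this.2 h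
        have : m = String.ofList cs := by
          rw [← hml]; simp
        exact this
      · unfold altCond
        have : cs ≠ [] := fun h => by simp [h] at hempty
        simp [String.toList_ofList, this]
  | case3 cs hempty hcont hdot =>
      rw [altLoop_eq_foldl]
      rw [foldl_no_candidate]
      intro m hm
      cases hc : altCond cs m.toList with
      | false => rfl
      | true =>
      exfalso
      rcases cond_dot_or_eq cs m.toList hc with heq | hdotmem
      · have : m = String.ofList cs := by rw [← heq]; simp
        subst this
        simp at hcont
        exact hcont hm
      · have : PySem.Chars.isIn ['.'] cs = true := by
          rw [PySem.Chars.isIn_iff_infix]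
          obtain ⟨l, r, hlr⟩ := List.append_of_mem hdotmem
          exact ⟨l, r, by rw [hlr]; simp⟩
        rw [this] at hdot
        simp at hdot
  | case4 cs hempty hcont hdot ih =>
      have hdot' : '.' ∈ cs := by
        have : PySem.Chars.isIn ['.'] cs = true := by
          cases hb : PySem.Chars.isIn ['.'] cs with
          | false => exact absurd hb hdot
          | true => rfl
        obtain ⟨l, r, hlr⟩ := (PySem.Chars.isIn_iff_infix _ _).mp this
        rw [← hlr]; simp
      obtain ⟨suf, hdec, hsuf⟩ := rsplit_decomp cs hdot'
      rw [ih, altLoop_eq_foldl, altLoop_eq_foldl]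
      apply PySem.List.foldl_congr_mem
      intro acc m hm
      unfold altStep
      have hmne : m.toList ≠ cs := by
        intro h
        have : m = String.ofList cs := by rw [← h]; simp
        subst this
        simp at hcont
        exact hcont hm
      have := cond_step (rsplitDotHead cs) suf m.toList hsuf (by rw [← hdec]; exact hmne)
      rw [← hdec] at this
      rw [this]

-- ===== VERDICT (by name: the statement is the Claim_ definition above) =====
theorem nearest_known_spec : Claim_equal_nearest_known := by
  intro name modules _
  unfold Spec_nearest_known nearest_known nearest_known_alt
  cases name with
  | none =>
      simp [nearestKnownLoop]
  | some n =>
      by_cases h : n.toList.isEmpty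
      · simp [nearestKnownLoop, show n.toList = [] from List.isEmpty_iff.mp h]
      · simpa [h] using main_lemma n.toList modules
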